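-- pv_equiv track=rewrite | github.com/microyiz/JAP_GPT | jap_paper_revise.py | generate_question_separators
-- ===== SOURCE A (Python) =====
-- def generate_question_separators(max_questions: int):
--         """
--         Generate a list of question separators up to a specified number of questions.
--         Combines circled numbers with other numeric patterns to cover up to max_questions.
--         """
--         circled_numbers = []
--         for i in range(1, max_questions + 1):
--             if 1 <= i <= 20:
--                 circled_numbers.append(chr(0x2460 + i - 1))  # ① to ⑳
--             elif 21 <= i <= 35:
--                 circled_numbers.append(chr(0x3251 + i - 21))  # ㉑ to ㉟
--             elif 36 <= i <= 50:
--                 circled_numbers.append(chr(0x32B1 + i - 36))  # ㊱ to ㊿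
--         return circled_numbers
-- ===== SOURCE B (Python) =====
-- CIRCLED = ([chr(0x2460 + k) for k in range(20)] +    # 1..20
--            [chr(0x3251 + k) for k in range(15)] +    # 21..35
--            [chr(0x32B1 + k) for k in range(15)])     # 36..50
--
-- def generate_question_separators(max_questions: int):
--     return CIRCLED[:max(0, max_questions)]
-- ===== Notes on version B (the rewrite author's own statement) =====
-- stated objective: faster
-- what changed: Replaces the branchy per-index loop by a fixed precomputed table of all circled-number characters (three range comprehensions) returned as a slice of length max(0, max_questions), so work is bounded by the table size instead of the input.
import Mathlib
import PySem

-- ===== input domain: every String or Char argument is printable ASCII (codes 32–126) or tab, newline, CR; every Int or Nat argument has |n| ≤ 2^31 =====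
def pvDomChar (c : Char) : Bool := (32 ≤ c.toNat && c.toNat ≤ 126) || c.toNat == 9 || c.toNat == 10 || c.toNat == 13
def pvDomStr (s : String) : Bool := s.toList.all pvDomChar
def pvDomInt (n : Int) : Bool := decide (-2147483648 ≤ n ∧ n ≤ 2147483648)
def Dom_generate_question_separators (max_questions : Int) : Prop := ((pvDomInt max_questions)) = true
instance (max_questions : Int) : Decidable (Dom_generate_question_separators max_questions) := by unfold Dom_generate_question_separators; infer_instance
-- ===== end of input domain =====

-- B replaces A's branchy per-index loop by a precomputed 50-entry table plus a slice (objective: simpler).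

-- ===== PORT A =====
-- chr(x) is ported as String.ofList [Char.ofNat x.toNat]; exact here since every code point built is a valid scalar value (0x2460..0x32BF).
def generate_question_separators (max_questions : Int) : List String :=
  (PySem.List.pyRange 1 (max_questions + 1) 1).foldl (fun acc i =>
    if 1 ≤ i ∧ i ≤ 20 then acc ++ [String.ofList [Char.ofNat (0x2460 + i - 1).toNat]]
    else if 21 ≤ i ∧ i ≤ 35 then acc ++ [String.ofList [Char.ofNat (0x3251 + i - 21).toNat]]
    else if 36 ≤ i ∧ i ≤ 50 then acc ++ [String.ofList [Char.ofNat (0x32B1 + i - 36).toNat]]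
    else acc) []

-- ===== PORT B =====
-- chr(x) ported as String.ofList [Char.ofNat x.toNat] (valid scalar values only).
def pvCircledTable : List String :=
  (PySem.List.pyRange 0 20 1).map (fun k => String.ofList [Char.ofNat (0x2460 + k).toNat])
  ++ (PySem.List.pyRange 0 15 1).map (fun k => String.ofList [Char.ofNat (0x3251 + k).toNat])
  ++ (PySem.List.pyRange 0 15 1).map (fun k => String.ofList [Char.ofNat (0x32B1 + k).toNat])

def generate_question_separators_alt (max_questions : Int) : List String :=
  PySem.List.slice pvCircledTable none (some (max 0 max_questions))

-- ===== PRECONDITION & SPEC =====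
def Spec_generate_question_separators (max_questions : Int) (out : List String) : Prop := out = generate_question_separators_alt max_questions
instance (max_questions : Int) (out : List String) : Decidable (Spec_generate_question_separators max_questions out) := by unfold Spec_generate_question_separators; infer_instance

-- ===== CLAIM (what is proved, stated in full; the proofs are below) =====
def Claim_equal_generate_question_separators : Prop := ∀ (max_questions : Int), Dom_generate_question_separators max_questions → Spec_generate_question_separators max_questions (generate_question_separators max_questions)

-- ===== LEMMAS AND PROOFS =====

-- the loop body of A, named for the proofs
def pvStep (acc : List String) (i : Int) : List String :=
  if 1 ≤ i ∧ i ≤ 20 then acc ++ [String.ofList [Char.ofNat (0x2460 + i - 1).toNat]]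
  else if 21 ≤ i ∧ i ≤ 35 then acc ++ [String.ofList [Char.ofNat (0x3251 + i - 21).toNat]]
  else if 36 ≤ i ∧ i ≤ 50 then acc ++ [String.ofList [Char.ofNat (0x32B1 + i - 36).toNat]]
  else acc

lemma pvA_eq_foldl_step (mq : Int) :
    generate_question_separators mq = (PySem.List.pyRange 1 (mq + 1) 1).foldl pvStep [] := rfl

-- iterations past 50 are no-ops
lemma pvFoldl_noop (l : List Int) (h : ∀ i ∈ l, 50 < i) (acc : List String) :
    l.foldl pvStep acc = acc := by
  induction l generalizing acc with
  | nil => rfl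
  | cons x xs ih =>
    have hx : 50 < x := h x (by simp)
    have hstep : pvStep acc x = acc := by
      unfold pvStep
      split_ifs with h1 h2 h3
      · exact absurd hx (by omega)
      · exact absurd hx (by omega)
      · exact absurd hx (by omega)
      · rfl
    rw [List.foldl_cons, hstep, ih (fun i hi => h i (List.mem_cons_of_mem _ hi)) acc]

-- the finitely many small cases, checked by the kernel
lemma pvSmall : ∀ n ∈ List.range 51,
    generate_question_separators (n : Int) = generate_question_separators_alt (n : Int) := by decide

lemma pvEq_nat_le50 (n : Nat) (hn : n ≤ 50) :
    generate_question_separators (n : Int) = generate_question_separators_alt (n : Int) :=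
  pvSmall n (by simpa using Nat.lt_succ_of_le hn)

lemma pvB_large {mq : Int} (h : 50 ≤ mq) :
    generate_question_separators_alt mq = generate_question_separators_alt 50 := by
  unfold generate_question_separators_alt
  rw [PySem.List.slice_to _ (by omega), PySem.List.slice_to _ (by omega)]
  have hlen : pvCircledTable.length = 50 := by decide
  rw [List.take_of_length_le (by omega), List.take_of_length_le (by omega)]

lemma pvA_large {mq : Int} (h : 50 ≤ mq) :
    generate_question_separators mq = generate_question_separators 50 := by
  rw [pvA_eq_foldl_step, pvA_eq_foldl_step]
  rw [PySem.List.pyRange_one_append 1 51 (mq + 1) (by omega) (by omega)]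
  rw [List.foldl_append]
  rw [pvFoldl_noop _ (fun i hi => by
    have := (PySem.List.mem_pyRange_one).mp hi; omega)]
  norm_num

lemma pvA_nonpos {mq : Int} (h : mq ≤ 0) : generate_question_separators mq = [] := by
  rw [pvA_eq_foldl_step, PySem.List.pyRange_one_eq_nil (by omega)]; rfl

lemma pvB_nonpos {mq : Int} (h : mq ≤ 0) : generate_question_separators_alt mq = [] := by
  unfold generate_question_separators_alt
  have : max 0 mq = 0 := by omega
  rw [this, PySem.List.slice_to _ (by omega)]
  simp

-- ===== VERDICT (by name: the statement is the Claim_ definition above) =====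
theorem generate_question_separators_spec : Claim_equal_generate_question_separators := by
  intro mq _
  unfold Spec_generate_question_separators
  by_cases h : mq ≤ 0
  · rw [pvA_nonpos h, pvB_nonpos h]
  · by_cases h50 : mq ≤ 50
    · have hn : mq = ((mq.toNat : Nat) : Int) := by omega
      rw [hn]
      exact pvEq_nat_le50 mq.toNat (by omega)
    · rw [pvA_large (by omega), pvB_large (by omega)]
      have : (50 : Int) = ((50 : Nat) : Int) := by norm_num
      rw [this]
      exact pvEq_nat_le50 50 (by omega)
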